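-- pv_equiv track=rewrite | github.com/Sayeeshwar/churn_prediction | src/utils.py | identify_retention_offers
-- ===== SOURCE A (Python) =====
-- def identify_retention_offers(churn_factors):
--     offers = []
--
--     for factor, _, coefficient in churn_factors:
--         if coefficient > 0:  # This factor increases churn probability
--             if "Contract_Month-to-month" in factor:
--                 offers.append("Special discount on a one-year contract")
--             elif "InternetService_Fiber" in factor:
--                 offers.append("Enhanced stability for your Fiber optic connection")
--             elif "has_techsupport" in factor and factor == 0:
--                 offers.append("Complimentary Tech Support for 3 months")
--             elif "has_onlinesecurity" in factor and factor == 0: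
--                 offers.append("Free Online Security package for 6 months")
--             elif "MonthlyCharges" in factor:
--                 offers.append("Loyalty discount on your monthly bill")
--             elif "PaymentMethod_Electronic" in factor:
--                 offers.append("10% discount for switching to automatic payment")
--             else:
--                 offers.append("Exclusive loyalty reward for valued customers")
--
--     if not offers:
--         offers.append("Special loyalty discount as a valued Vodafone customer")
--
--     return offers[:2]
-- ===== SOURCE B (Python) =====
-- _OFFERS = {
--     "Contract_Month-to-month": "Special discount on a one-year contract",
--     "InternetService_Fiber": "Enhanced stability for your Fiber optic connection",
--     "MonthlyCharges": "Loyalty discount on your monthly bill",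
--     "PaymentMethod_Electronic": "10% discount for switching to automatic payment",
-- }
--
--
-- def _offer_for(factor):
--     return next((offer for key, offer in _OFFERS.items() if key in factor),
--                 "Exclusive loyalty reward for valued customers")
--
--
-- def _collect(factors, room):
--     # recursively pick offers for the first `room` positive-coefficient factors
--     if room == 0 or not factors:
--         return []
--     (factor, _, coeff), rest = factors[0], factors[1:]
--     if coeff <= 0:
--         return _collect(rest, room)
--     return [_offer_for(factor)] + _collect(rest, room - 1)
--
--
-- def identify_retention_offers(churn_factors):
--     offers = _collect(churn_factors, 2)
--     return offers if offers else ["Special loyalty discount as a valued Vodafone customer"]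
-- ===== Notes on version B (the rewrite author's own statement) =====
-- stated objective: alternative
-- what changed: Replaces A's single imperative pass that appends an offer per if/elif branch and slices to [:2] at the end by a recursive decomposition: a budget-carrying recursion _collect(factors, room) that consumes the list structurally and stops after the first two positive-coefficient factors, mapping each through a priority dictionary (dropping the dead has_techsupport/has_onlinesecurity branches whose 'factor == 0' never holds for a string).
import Mathlib
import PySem

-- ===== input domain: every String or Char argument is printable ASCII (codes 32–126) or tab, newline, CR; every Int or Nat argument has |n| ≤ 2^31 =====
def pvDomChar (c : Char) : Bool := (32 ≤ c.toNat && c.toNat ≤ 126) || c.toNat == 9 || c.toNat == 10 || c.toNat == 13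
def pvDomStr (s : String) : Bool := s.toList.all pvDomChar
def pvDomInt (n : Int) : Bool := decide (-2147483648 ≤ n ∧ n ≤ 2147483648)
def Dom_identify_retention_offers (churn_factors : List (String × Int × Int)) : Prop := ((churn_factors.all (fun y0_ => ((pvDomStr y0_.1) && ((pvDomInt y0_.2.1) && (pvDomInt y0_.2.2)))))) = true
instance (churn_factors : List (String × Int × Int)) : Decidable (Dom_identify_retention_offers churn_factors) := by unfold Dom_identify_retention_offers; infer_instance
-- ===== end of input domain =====

-- B replaces A's single append-and-slice loop by a budget-carrying recursion over the list mapped through a priority dictionary (alternative; same result).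


-- ===== PORT A =====
-- literal transliteration of A; 'factor == 0' compares a str with an int, which is False in Python: ported as && false
def identify_retention_offers (churn_factors : List (String × Int × Int)) : List String :=
  let offers : List String :=
    churn_factors.foldl (fun offers p =>
      let factor := p.1
      let coefficient := p.2.2
      if coefficient > 0 then
        if PySem.Str.isIn "Contract_Month-to-month" factor then
          offers ++ ["Special discount on a one-year contract"]
        else if PySem.Str.isIn "InternetService_Fiber" factor then
          offers ++ ["Enhanced stability for your Fiber optic connection"]
        else if PySem.Str.isIn "has_techsupport" factor && false then
          offers ++ ["Complimentary Tech Support for 3 months"]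
        else if PySem.Str.isIn "has_onlinesecurity" factor && false then
          offers ++ ["Free Online Security package for 6 months"]
        else if PySem.Str.isIn "MonthlyCharges" factor then
          offers ++ ["Loyalty discount on your monthly bill"]
        else if PySem.Str.isIn "PaymentMethod_Electronic" factor then
          offers ++ ["10% discount for switching to automatic payment"]
        else
          offers ++ ["Exclusive loyalty reward for valued customers"]
      else offers) []
  let offers := if offers = [] then offers ++ ["Special loyalty discount as a valued Vodafone customer"] else offers
  PySem.List.slice offers none (some 2)

-- ===== PORT B =====
-- the priority dictionary _OFFERS (insertion order)
def pvOffersDict : PySem.Dict String String :=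
  PySem.Dict.ofList [("Contract_Month-to-month", "Special discount on a one-year contract"),
   ("InternetService_Fiber", "Enhanced stability for your Fiber optic connection"),
   ("MonthlyCharges", "Loyalty discount on your monthly bill"),
   ("PaymentMethod_Electronic", "10% discount for switching to automatic payment")]

-- _offer_for: first item of the dictionary whose key is a substring of factor, else the generic offer
def pvOfferFor (factor : String) : String :=
  match (PySem.Dict.items pvOffersDict).find? (fun kv => PySem.Str.isIn kv.1 factor) with
  | some kv => kv.2
  | none => "Exclusive loyalty reward for valued customers"

-- _collect: budget-carrying structural recursion
def pvCollect : List (String × Int × Int) → Nat → List String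
  | _, 0 => []
  | [], _ + 1 => []
  | p :: rest, room + 1 =>
    if p.2.2 ≤ 0 then pvCollect rest (room + 1)
    else pvOfferFor p.1 :: pvCollect rest room

def identify_retention_offers_alt (churn_factors : List (String × Int × Int)) : List String :=
  let offers := pvCollect churn_factors 2
  if offers ≠ [] then offers else ["Special loyalty discount as a valued Vodafone customer"]

-- ===== PRECONDITION & SPEC =====
def Spec_identify_retention_offers (churn_factors : List (String × Int × Int)) (out : List String) : Prop := out = identify_retention_offers_alt churn_factors
instance (churn_factors : List (String × Int × Int)) (out : List String) : Decidable (Spec_identify_retention_offers churn_factors out) := by unfold Spec_identify_retention_offers; infer_instance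

-- ===== CLAIM =====
def Claim_equal_identify_retention_offers : Prop := ∀ (churn_factors : List (String × Int × Int)), Dom_identify_retention_offers churn_factors → Spec_identify_retention_offers churn_factors (identify_retention_offers churn_factors)

-- ===== LEMMAS AND PROOFS =====

-- the list of offers A builds before truncation, as a filterMap
def pvOffers (cf : List (String × Int × Int)) : List String :=
  cf.filterMap (fun p => if p.2.2 > 0 then some (pvOfferFor p.1) else none)

-- A's branch chain computes pvOfferFor
theorem pvChain_eq (factor : String) (offers : List String) :
    (if PySem.Str.isIn "Contract_Month-to-month" factor then
        offers ++ ["Special discount on a one-year contract"]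
      else if PySem.Str.isIn "InternetService_Fiber" factor then
        offers ++ ["Enhanced stability for your Fiber optic connection"]
      else if PySem.Str.isIn "has_techsupport" factor && false then
        offers ++ ["Complimentary Tech Support for 3 months"]
      else if PySem.Str.isIn "has_onlinesecurity" factor && false then
        offers ++ ["Free Online Security package for 6 months"]
      else if PySem.Str.isIn "MonthlyCharges" factor then
        offers ++ ["Loyalty discount on your monthly bill"]
      else if PySem.Str.isIn "PaymentMethod_Electronic" factor then
        offers ++ ["10% discount for switching to automatic payment"]
      else
        offers ++ ["Exclusive loyalty reward for valued customers"]) =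
    offers ++ [pvOfferFor factor] := by
  have hit : PySem.Dict.items pvOffersDict =
      [("Contract_Month-to-month", "Special discount on a one-year contract"),
       ("InternetService_Fiber", "Enhanced stability for your Fiber optic connection"),
       ("MonthlyCharges", "Loyalty discount on your monthly bill"),
       ("PaymentMethod_Electronic", "10% discount for switching to automatic payment")] := by decide
  simp only [pvOfferFor, hit, List.find?, Bool.and_false]
  split_ifs <;> simp_all

theorem pvFoldA_eq (cf : List (String × Int × Int)) (acc : List String) :
    cf.foldl (fun offers p =>
      let factor := p.1
      let coefficient := p.2.2
      if coefficient > 0 then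
        if PySem.Str.isIn "Contract_Month-to-month" factor then
          offers ++ ["Special discount on a one-year contract"]
        else if PySem.Str.isIn "InternetService_Fiber" factor then
          offers ++ ["Enhanced stability for your Fiber optic connection"]
        else if PySem.Str.isIn "has_techsupport" factor && false then
          offers ++ ["Complimentary Tech Support for 3 months"]
        else if PySem.Str.isIn "has_onlinesecurity" factor && false then
          offers ++ ["Free Online Security package for 6 months"]
        else if PySem.Str.isIn "MonthlyCharges" factor then
          offers ++ ["Loyalty discount on your monthly bill"]
        else if PySem.Str.isIn "PaymentMethod_Electronic" factor then
          offers ++ ["10% discount for switching to automatic payment"]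
        else
          offers ++ ["Exclusive loyalty reward for valued customers"]
      else offers) acc = acc ++ pvOffers cf := by
  induction cf generalizing acc with
  | nil => simp [pvOffers]
  | cons p rest ih =>
    simp only [List.foldl_cons]
    by_cases h : p.2.2 > 0
    · rw [if_pos h, pvChain_eq, ih]
      simp [pvOffers, h]
    · rw [if_neg h, ih]
      simp [pvOffers, h]

-- the budget recursion takes the first `room` offers
theorem pvCollect_eq (cf : List (String × Int × Int)) (room : Nat) :
    pvCollect cf room = (pvOffers cf).take room := by
  induction cf generalizing room with
  | nil => cases room <;> simp [pvCollect, pvOffers]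
  | cons p rest ih =>
    cases room with
    | zero => simp [pvCollect]
    | succ r =>
      by_cases h : p.2.2 ≤ 0
      · rw [pvCollect, if_pos h, ih]
        simp [pvOffers, not_lt.mpr h]
      · rw [pvCollect, if_neg h, ih]
        simp [pvOffers, lt_of_not_ge h]

theorem identify_retention_offers_spec : Claim_equal_identify_retention_offers := by
  intro cf _
  unfold Spec_identify_retention_offers identify_retention_offers identify_retention_offers_alt
  rw [pvFoldA_eq, pvCollect_eq]
  simp only [List.nil_append]
  by_cases h : pvOffers cf = []
  · simp [h, PySem.List.slice]
  · rw [if_neg h, if_pos (by simp [h, List.take_eq_nil_iff])]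
    simp [PySem.List.slice_to]
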